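-- pv_equiv track=rewrite | github.com/mxrosenthal/advent_of_code_2022 | aoc_day3_code.py | make_the_groups
-- ===== SOURCE A (Python) =====
-- def make_the_groups(data):
--     group_dict = {}
--     group = []
--     i = 0
--     j = 1
--
--     for line in data:
--         group_name = "group " + str(j)
--         if i < 3:
--             group.append(line)
--             i += 1
--         if i == 3:
--             group_dict[group_name] = group
--             group = []
--             i = 0
--             j += 1
--     return group_dict
-- ===== SOURCE B (Python) =====
-- def make_the_groups(data):
--     lst = list(data)
--     result = {}
--     g = 1
--     i = 0
--     n = len(lst)
--     while i + 3 <= n: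
--         result["group " + str(g)] = lst[i:i + 3]
--         i += 3
--         g += 1
--     return result
-- ===== Notes on version B (the rewrite author's own statement) =====
-- stated objective: simpler
-- what changed: Replaces A's per-line fold with a mutable partial-group buffer and a mod-3 counter by a while loop over chunk start indices that assigns whole triples lst[i:i+3] at once, so no counter or partial group is kept and the incomplete tail is dropped by the i+3<=n test.
import Mathlib
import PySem

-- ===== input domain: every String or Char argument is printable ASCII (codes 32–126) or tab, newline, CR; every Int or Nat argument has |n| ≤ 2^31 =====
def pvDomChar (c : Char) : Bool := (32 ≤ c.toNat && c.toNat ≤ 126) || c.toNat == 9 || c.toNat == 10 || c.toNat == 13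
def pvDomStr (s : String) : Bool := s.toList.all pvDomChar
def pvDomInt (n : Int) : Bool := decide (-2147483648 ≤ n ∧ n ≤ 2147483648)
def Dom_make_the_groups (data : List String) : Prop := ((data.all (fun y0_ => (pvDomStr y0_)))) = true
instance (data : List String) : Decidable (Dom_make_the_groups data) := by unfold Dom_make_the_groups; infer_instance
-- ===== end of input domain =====

-- B replaces A's per-line fold with a partial-group buffer and a mod-3 counter by a while loop
-- over chunk start indices that assigns whole triples lst[i:i+3] (simpler decomposition, same cost).

-- ===== PORT A =====
-- one iteration of A's `for line in data` loop over the state (group_dict, group, i, j)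
def pvAStep (s : PySem.Dict String (List String) × List String × Int × Int) (line : String) :
    PySem.Dict String (List String) × List String × Int × Int :=
  let (group_dict, group, i, j) := s
  let group_name := "group " ++ PySem.Int.toStr j
  let (group, i) := if i < 3 then (group ++ [line], i + 1) else (group, i)
  if i == 3 then (group_dict.insert group_name group, [], 0, j + 1)
  else (group_dict, group, i, j)

def make_the_groups (data : List String) : List (String × List String) :=
  (data.foldl pvAStep (PySem.Dict.empty, [], 0, 1)).1.items

-- ===== PORT B =====
-- B's `while i + 3 <= n` loop over the state (result, g, i); lst and n = len(lst) are fixed.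
def pvBLoop (lst : List String) (n : Int) (result : PySem.Dict String (List String))
    (g : Int) (i : Int) : PySem.Dict String (List String) :=
  if _h : i + 3 ≤ n then
    pvBLoop lst n (result.insert ("group " ++ PySem.Int.toStr g)
      (PySem.List.slice lst (some i) (some (i + 3)))) (g + 1) (i + 3)
  else result
termination_by (n - i).toNat
decreasing_by omega

def make_the_groups_alt (data : List String) : List (String × List String) :=
  (pvBLoop data (data.length : Int) PySem.Dict.empty 1 0).items

-- ===== PRECONDITION & SPEC =====
def Spec_make_the_groups (data : List String) (out : List (String × List String)) : Prop := out = make_the_groups_alt data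
instance (data : List String) (out : List (String × List String)) : Decidable (Spec_make_the_groups data out) := by unfold Spec_make_the_groups; infer_instance

-- ===== CLAIM (what is proved, stated in full; the proofs are below) =====
def Claim_equal_make_the_groups : Prop := ∀ (data : List String), Dom_make_the_groups data → Spec_make_the_groups data (make_the_groups data)

-- ===== LEMMAS AND PROOFS =====

-- proof-only reference function: consume the list three elements at a time
def pvChunk (d : PySem.Dict String (List String)) (lst : List String) (j : Int) :
    PySem.Dict String (List String) :=
  match lst with
  | a :: b :: c :: rest => pvChunk (d.insert ("group " ++ PySem.Int.toStr j) [a, b, c]) rest (j + 1)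
  | _ => d

-- From the state (d, [], 0, j), A's fold produces exactly the triple-chunking result.
theorem pv_A_eq_chunk (lst : List String) (d : PySem.Dict String (List String)) (j : Int) :
    (lst.foldl pvAStep (d, [], 0, j)).1 = pvChunk d lst j := by
  match lst with
  | [] => simp [pvChunk]
  | [a] => simp [pvChunk, List.foldl, pvAStep]
  | [a, b] => simp [pvChunk, List.foldl, pvAStep]
  | a :: b :: c :: rest =>
      have ih := pv_A_eq_chunk rest (d.insert ("group " ++ PySem.Int.toStr j) [a, b, c]) (j + 1)
      simpa [pvChunk, List.foldl, pvAStep] using ih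

-- B's index loop started at a natural index i computes the triple-chunking of lst.drop i.
theorem pv_B_eq_chunk (lst : List String) (d : PySem.Dict String (List String)) (j : Int) (i : Nat) :
    pvBLoop lst (lst.length : Int) d j (i : Int) = pvChunk d (lst.drop i) j := by
  rw [pvBLoop]
  by_cases h : (i : Int) + 3 ≤ (lst.length : Int)
  · simp only [dif_pos h]
    have hlen : 3 ≤ (lst.drop i).length := by simp [List.length_drop]; omega
    obtain ⟨a, b, c, rest, he⟩ : ∃ a b c rest, lst.drop i = a :: b :: c :: rest := by
      rcases e : lst.drop i with _ | ⟨a, _ | ⟨b, _ | ⟨c, rest⟩⟩⟩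
      · rw [e] at hlen; simp at hlen
      · rw [e] at hlen; simp at hlen
      · rw [e] at hlen; simp at hlen
      · exact ⟨a, b, c, rest, rfl⟩
    have hrest : lst.drop (i + 3) = rest := by
      have h3 : lst.drop (i + 3) = (lst.drop i).drop 3 := by
        rw [List.drop_drop]
      rw [h3, he]; rfl
    have hslice : PySem.List.slice lst (some (i : Int)) (some ((i : Int) + 3)) = [a, b, c] := by
      have h3 : ((i : Int) + 3) = ((i : Int) + ((3 : Nat) : Int)) := by norm_num
      rw [h3, PySem.List.slice_natCast_add, he]
      simp
    have ih := pv_B_eq_chunk lst (d.insert ("group " ++ PySem.Int.toStr j) [a, b, c]) (j + 1) (i + 3)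
    rw [hslice, he]
    have hcast : ((i : Int) + 3) = (((i + 3 : Nat) : Int)) := by push_cast; ring
    rw [hcast]
    rw [ih, hrest]
    simp [pvChunk]
  · simp only [dif_neg h]
    have hlen : (lst.drop i).length < 3 := by simp [List.length_drop]; omega
    rcases e : lst.drop i with _ | ⟨a, _ | ⟨b, _ | ⟨c, rest⟩⟩⟩
    · simp [pvChunk]
    · simp [pvChunk]
    · simp [pvChunk]
    · rw [e] at hlen; simp at hlen; omega
termination_by lst.length - i
decreasing_by omega

-- ===== VERDICT (by name: the statement is the Claim_ definition above) =====
theorem make_the_groups_spec : Claim_equal_make_the_groups := by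
  intro data _
  unfold Spec_make_the_groups make_the_groups make_the_groups_alt
  rw [pv_A_eq_chunk]
  have := pv_B_eq_chunk data PySem.Dict.empty 1 0
  simp only [Nat.cast_zero, List.drop_zero] at this
  rw [this]
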